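-- pv_equiv track=rewrite | github.com/iwannabetall/SCOTUS | scotus_byissue.py | vote_counter
-- ===== SOURCE A (Python) =====
-- def vote_counter(justices_on_case, majority, dissent, same_vote, J_pair, worked_together, issue_voted_together, caseissuearea, worked_together_freq):
-- 	for i in range(len(justices_on_case)):
-- 		J1 = justices_on_case[i]
-- 		for j in range(len(justices_on_case)):
-- 			J2 = justices_on_case[j]
-- 			if J1 < justices_on_case[j]:
-- 				#count = same_vote[J_pair.index(str(J1) + "_" + str(majority[j]))]
-- 				#check if voted together in majority or dissent
-- 				pair_index = J_pair.index(str(J1) + "_" + str(justices_on_case[j]))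
-- 				if ((J1 in majority) and (J2 in majority)):
-- 					same_vote[pair_index] += 1  #number of times pairs of justices voted together
-- 					worked_together_freq[pair_index] += 1  #freq of working together
-- 					##number times voted together on a particular issue
-- 					worked_together[pair_index][caseissuearea - 1] += 1  #worked on same case topic freq
-- 					issue_voted_together[pair_index][caseissuearea - 1] += 1  #case issue area index needs minus 1 b/c 0 indexed
-- 				elif ((J1 in dissent) and (J2 in dissent)):
-- 					same_vote[pair_index] += 1  #number of times pairs of justices voted together
-- 					worked_together_freq[pair_index] += 1  #freq of working together
-- 					worked_together[pair_index][caseissuearea - 1] += 1  #worked on same case topic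
-- 					issue_voted_together[pair_index][caseissuearea - 1] += 1  #case issue area index needs minus 1 b/c 0 indexed
-- 					##number times voted together on a particular issue
-- 				else: ##did not vote together
-- 					worked_together[pair_index][caseissuearea - 1] += 1  #worked on same case topic freq
-- 					worked_together_freq[pair_index] += 1  #freq of working together
-- 				# print J_pair[pair_index] + " " + str(J1) + " " + str(justices_on_case[j])
-- 	return same_vote, worked_together, issue_voted_together, worked_together_freq
-- ===== SOURCE B (Python) =====
-- # B: staged bloc decomposition instead of A's single n x n scan with a
-- # three-way membership branch per pair: pass 1 credits every distinct-valued
-- # case pair as working together; passes 2-3 credit voting together from the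
-- # pairs *inside* the majority bloc and inside the dissent bloc (dissent pairs
-- # already fully in the majority are skipped, matching A's elif precedence).
-- # Mutates the four counter lists in place like A; equivalence is on the return value.
--
-- def _pairs(vals):
--     # unordered occurrence pairs with distinct values, each as (smaller, larger)
--     return [(a, b) if a < b else (b, a)
--             for i, a in enumerate(vals)
--             for b in vals[i + 1:]
--             if a != b]
--
-- def vote_counter(justices_on_case, majority, dissent, same_vote, J_pair, worked_together, issue_voted_together, caseissuearea, worked_together_freq):
--     area = caseissuearea - 1
--     # pass 1: every distinct-valued pair on the case worked together
--     for lo, hi in _pairs(justices_on_case):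
--         idx = J_pair.index(str(lo) + "_" + str(hi))
--         worked_together[idx][area] += 1
--         worked_together_freq[idx] += 1
--     # pass 2: pairs within the majority bloc voted together
--     maj_pairs = _pairs([j for j in justices_on_case if j in majority])
--     # pass 3: pairs within the dissent bloc, unless already a majority pair
--     dis_pairs = [p for p in _pairs([j for j in justices_on_case if j in dissent])
--                  if not (p[0] in majority and p[1] in majority)]
--     for lo, hi in maj_pairs + dis_pairs:
--         idx = J_pair.index(str(lo) + "_" + str(hi))
--         same_vote[idx] += 1
--         issue_voted_together[idx][area] += 1
--     return same_vote, worked_together, issue_voted_together, worked_together_freq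
-- ===== Notes on version B (the rewrite author's own statement) =====
-- stated objective: alternative
-- what changed: B decomposes A's single n x n scan with a three-way membership branch per pair into staged bloc passes: one pass over all distinct-valued case pairs updates the worked-together counters, then the voted-together counters are updated from the pairs generated inside the filtered majority bloc and inside the filtered dissent bloc (dissent pairs already fully in the majority are skipped, preserving A's elif precedence).
import Mathlib
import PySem

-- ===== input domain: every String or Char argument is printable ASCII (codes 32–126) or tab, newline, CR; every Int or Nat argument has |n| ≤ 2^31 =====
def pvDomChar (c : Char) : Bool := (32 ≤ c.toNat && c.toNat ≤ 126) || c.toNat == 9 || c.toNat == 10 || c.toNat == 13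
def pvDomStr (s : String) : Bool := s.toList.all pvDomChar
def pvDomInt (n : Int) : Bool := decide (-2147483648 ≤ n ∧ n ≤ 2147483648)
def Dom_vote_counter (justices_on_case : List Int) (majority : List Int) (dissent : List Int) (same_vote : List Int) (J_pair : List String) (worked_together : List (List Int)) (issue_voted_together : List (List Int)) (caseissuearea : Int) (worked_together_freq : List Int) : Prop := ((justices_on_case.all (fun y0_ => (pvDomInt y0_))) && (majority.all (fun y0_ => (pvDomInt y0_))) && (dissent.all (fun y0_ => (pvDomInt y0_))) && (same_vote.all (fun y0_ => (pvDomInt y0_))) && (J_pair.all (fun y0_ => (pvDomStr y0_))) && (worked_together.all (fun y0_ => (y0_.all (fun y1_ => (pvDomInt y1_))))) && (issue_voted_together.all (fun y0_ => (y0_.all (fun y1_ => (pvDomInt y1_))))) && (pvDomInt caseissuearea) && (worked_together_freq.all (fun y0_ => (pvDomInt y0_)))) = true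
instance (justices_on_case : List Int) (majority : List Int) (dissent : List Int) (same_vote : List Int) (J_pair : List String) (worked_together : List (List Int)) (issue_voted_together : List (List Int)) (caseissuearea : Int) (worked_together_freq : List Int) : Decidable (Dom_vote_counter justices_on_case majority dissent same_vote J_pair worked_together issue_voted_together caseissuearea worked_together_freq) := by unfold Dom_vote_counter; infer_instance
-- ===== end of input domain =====

-- B replaces A's single n×n scan with a three-way membership branch per pair by staged
-- bloc passes: one pass over all distinct-valued case pairs for the worked-together
-- counters, then passes over the pairs inside the majority bloc and inside the dissent
-- bloc (skipping dissent pairs already fully in the majority, A's elif precedence) for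
-- the voted-together counters (objective: alternative). Both Pythons mutate the four
-- counter arguments in place; the equivalence proved here is about the RETURN value
-- (B performs the same mutations).

-- shared Python-semantics helpers: `xs[k] += 1` / `xss[k][r] += 1` with Python's
-- negative-index wrap; they leave the list unchanged exactly where Python raises
-- IndexError (those inputs are excluded by Pre_vote_counter)
def pvWrap (len : Nat) (k : Int) : Int := if k < 0 then k + len else k

-- Python index k is valid for a list of length len (negative wrap allowed)
abbrev pvOkIdx (len : Nat) (k : Int) : Prop := 0 ≤ pvWrap len k ∧ pvWrap len k < (len : Int)

def pvIncAt (xs : List Int) (k : Int) : List Int :=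
  if pvOkIdx xs.length k then xs.modify (pvWrap xs.length k).toNat (· + 1) else xs

def pvIncRowAt (xss : List (List Int)) (k : Int) (r : Int) : List (List Int) :=
  if pvOkIdx xss.length k then xss.modify (pvWrap xss.length k).toNat (fun row => pvIncAt row r) else xss

-- str(a) + "_" + str(b)
def pvKey (a b : Int) : String := PySem.Int.toStr a ++ "_" ++ PySem.Int.toStr b

-- ===== PORT A =====
def vote_counter (justices_on_case : List Int) (majority : List Int) (dissent : List Int) (same_vote : List Int) (J_pair : List String) (worked_together : List (List Int)) (issue_voted_together : List (List Int)) (caseissuearea : Int) (worked_together_freq : List Int) : List Int × List (List Int) × List (List Int) × List Int :=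
  (List.range justices_on_case.length).foldl (fun s i =>
    let J1 := justices_on_case.getD i 0
    (List.range justices_on_case.length).foldl (fun s j =>
      let J2 := justices_on_case.getD j 0
      if J1 < J2 then
        match PySem.List.index? J_pair (pvKey J1 J2) with
        | none => s   -- J_pair.index raises ValueError here (excluded by Pre_)
        | some pair_index =>
          if J1 ∈ majority ∧ J2 ∈ majority then
            (pvIncAt s.1 pair_index, pvIncRowAt s.2.1 pair_index (caseissuearea - 1),
             pvIncRowAt s.2.2.1 pair_index (caseissuearea - 1), pvIncAt s.2.2.2 pair_index)
          else if J1 ∈ dissent ∧ J2 ∈ dissent then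
            (pvIncAt s.1 pair_index, pvIncRowAt s.2.1 pair_index (caseissuearea - 1),
             pvIncRowAt s.2.2.1 pair_index (caseissuearea - 1), pvIncAt s.2.2.2 pair_index)
          else
            (s.1, pvIncRowAt s.2.1 pair_index (caseissuearea - 1), s.2.2.1, pvIncAt s.2.2.2 pair_index)
      else s) s)
    (same_vote, worked_together, issue_voted_together, worked_together_freq)

-- ===== PORT B =====
-- Source B's `_pairs` helper: unordered occurrence pairs with distinct values, (smaller, larger)
def pvNorm (a b : Int) : Option (Int × Int) :=
  if a = b then none else if a < b then some (a, b) else some (b, a)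

def pvPairsOf : List Int → List (Int × Int)
  | [] => []
  | a :: t => t.filterMap (pvNorm a) ++ pvPairsOf t

def vote_counter_alt (justices_on_case : List Int) (majority : List Int) (dissent : List Int) (same_vote : List Int) (J_pair : List String) (worked_together : List (List Int)) (issue_voted_together : List (List Int)) (caseissuearea : Int) (worked_together_freq : List Int) : List Int × List (List Int) × List (List Int) × List Int :=
  let area := caseissuearea - 1
  -- pass 1: every distinct-valued pair on the case worked together
  let s1 := (pvPairsOf justices_on_case).foldl (fun s p =>
      match PySem.List.index? J_pair (pvKey p.1 p.2) with
      | none => s   -- J_pair.index raises ValueError here (excluded by Pre_)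
      | some idx => (pvIncRowAt s.1 idx area, pvIncAt s.2 idx))
    (worked_together, worked_together_freq)
  -- pass 2: pairs within the majority bloc voted together
  let maj_pairs := pvPairsOf (justices_on_case.filter (fun j => decide (j ∈ majority)))
  -- pass 3: pairs within the dissent bloc, unless already a majority pair
  let dis_pairs := (pvPairsOf (justices_on_case.filter (fun j => decide (j ∈ dissent)))).filter
      (fun p => !(decide (p.1 ∈ majority) && decide (p.2 ∈ majority)))
  let s2 := (maj_pairs ++ dis_pairs).foldl (fun s p =>
      match PySem.List.index? J_pair (pvKey p.1 p.2) with
      | none => s   -- J_pair.index raises ValueError here (excluded by Pre_)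
      | some idx => (pvIncAt s.1 idx, pvIncRowAt s.2 idx area))
    (same_vote, issue_voted_together)
  (s2.1, s1.1, s2.2, s1.2)

-- ===== PRECONDITION & SPEC =====
-- Pre_ excludes exactly the inputs where A raises: a fired pair (J1 < J2) whose key is
-- missing from J_pair (ValueError), or whose pair_index / issue-area index falls outside
-- the lists the fired branch touches (IndexError).
def Pre_vote_counter (justices_on_case : List Int) (majority : List Int) (dissent : List Int) (same_vote : List Int) (J_pair : List String) (worked_together : List (List Int)) (issue_voted_together : List (List Int)) (caseissuearea : Int) (worked_together_freq : List Int) : Prop :=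
  ∀ i ∈ List.range justices_on_case.length, ∀ j ∈ List.range justices_on_case.length,
    justices_on_case.getD i 0 < justices_on_case.getD j 0 →
    ∃ m ∈ (PySem.List.index? J_pair (pvKey (justices_on_case.getD i 0) (justices_on_case.getD j 0))).toList,
      m < worked_together_freq.length ∧ m < worked_together.length ∧
      pvOkIdx (worked_together.getD m []).length (caseissuearea - 1) ∧
      (((justices_on_case.getD i 0 ∈ majority ∧ justices_on_case.getD j 0 ∈ majority) ∨
        (justices_on_case.getD i 0 ∈ dissent ∧ justices_on_case.getD j 0 ∈ dissent)) →
        m < same_vote.length ∧ m < issue_voted_together.length ∧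
        pvOkIdx (issue_voted_together.getD m []).length (caseissuearea - 1))

instance (justices_on_case : List Int) (majority : List Int) (dissent : List Int) (same_vote : List Int) (J_pair : List String) (worked_together : List (List Int)) (issue_voted_together : List (List Int)) (caseissuearea : Int) (worked_together_freq : List Int) : Decidable (Pre_vote_counter justices_on_case majority dissent same_vote J_pair worked_together issue_voted_together caseissuearea worked_together_freq) := by unfold Pre_vote_counter; infer_instance

def pvWitness_vote_counter : List Int × List Int × List Int × List Int × List String × List (List Int) × List (List Int) × Int × List Int :=
  ([1, 2], [1, 2], [], [0], ["1_2"], [[0]], [[0]], 1, [0])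

def Spec_vote_counter (justices_on_case : List Int) (majority : List Int) (dissent : List Int) (same_vote : List Int) (J_pair : List String) (worked_together : List (List Int)) (issue_voted_together : List (List Int)) (caseissuearea : Int) (worked_together_freq : List Int) (out : List Int × List (List Int) × List (List Int) × List Int) : Prop := out = vote_counter_alt justices_on_case majority dissent same_vote J_pair worked_together issue_voted_together caseissuearea worked_together_freq
instance (justices_on_case : List Int) (majority : List Int) (dissent : List Int) (same_vote : List Int) (J_pair : List String) (worked_together : List (List Int)) (issue_voted_together : List (List Int)) (caseissuearea : Int) (worked_together_freq : List Int) (out : List Int × List (List Int) × List (List Int) × List Int) : Decidable (Spec_vote_counter justices_on_case majority dissent same_vote J_pair worked_together issue_voted_together caseissuearea worked_together_freq out) := by unfold Spec_vote_counter; infer_instance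

-- ===== CLAIM (what is proved, stated in full; the proofs are below) =====
def Claim_equal_vote_counter : Prop := ∀ (justices_on_case : List Int) (majority : List Int) (dissent : List Int) (same_vote : List Int) (J_pair : List String) (worked_together : List (List Int)) (issue_voted_together : List (List Int)) (caseissuearea : Int) (worked_together_freq : List Int), Dom_vote_counter justices_on_case majority dissent same_vote J_pair worked_together issue_voted_together caseissuearea worked_together_freq → Pre_vote_counter justices_on_case majority dissent same_vote J_pair worked_together issue_voted_together caseissuearea worked_together_freq → Spec_vote_counter justices_on_case majority dissent same_vote J_pair worked_together issue_voted_together caseissuearea worked_together_freq (vote_counter justices_on_case majority dissent same_vote J_pair worked_together issue_voted_together caseissuearea worked_together_freq)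

-- ===== LEMMAS AND PROOFS =====

-- A's per-pair update, fed an ordered pair (lo, hi), lo < hi
def pvUpd (majority dissent : List Int) (J_pair : List String) (ar : Int)
    (s : List Int × List (List Int) × List (List Int) × List Int) (p : Int × Int) :
    List Int × List (List Int) × List (List Int) × List Int :=
  match PySem.List.index? J_pair (pvKey p.1 p.2) with
  | none => s
  | some m =>
    if (p.1 ∈ majority ∧ p.2 ∈ majority) ∨ (p.1 ∈ dissent ∧ p.2 ∈ dissent) then
      (pvIncAt s.1 m, pvIncRowAt s.2.1 m ar, pvIncRowAt s.2.2.1 m ar, pvIncAt s.2.2.2 m)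
    else
      (s.1, pvIncRowAt s.2.1 m ar, s.2.2.1, pvIncAt s.2.2.2 m)

-- B's two loop bodies as named step functions
def pvW (J_pair : List String) (ar : Int) (s : List (List Int) × List Int) (p : Int × Int) :
    List (List Int) × List Int :=
  match PySem.List.index? J_pair (pvKey p.1 p.2) with
  | none => s
  | some m => (pvIncRowAt s.1 m ar, pvIncAt s.2 m)

def pvV (J_pair : List String) (ar : Int) (s : List Int × List (List Int)) (p : Int × Int) :
    List Int × List (List Int) :=
  match PySem.List.index? J_pair (pvKey p.1 p.2) with
  | none => s
  | some m => (pvIncAt s.1 m, pvIncRowAt s.2 m ar)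

-- the ordered value pair A emits at (i, j)
def pvPairA (joc : List Int) (i j : Nat) : Option (Int × Int) :=
  if joc.getD i 0 < joc.getD j 0 then some (joc.getD i 0, joc.getD j 0) else none

def pvPairsA (joc : List Int) (m : Nat) : List (Int × Int) :=
  (List.range m).flatMap (fun i => (List.range m).flatMap (fun j => (pvPairA joc i j).toList))

-- voted-together test as a Bool predicate on a pair
def pvVotedB (majority dissent : List Int) (p : Int × Int) : Bool :=
  (decide (p.1 ∈ majority) && decide (p.2 ∈ majority)) ||
  (decide (p.1 ∈ dissent) && decide (p.2 ∈ dissent))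

lemma modify_comm {α : Type} (f g : α → α) (h : ∀ x, f (g x) = g (f x)) (l : List α) (i j : Nat) :
    (l.modify i f).modify j g = (l.modify j g).modify i f := by
  apply List.ext_getElem
  · simp
  · intro k hk1 hk2
    simp only [List.getElem_modify]
    by_cases hik : i = k <;> by_cases hjk : j = k <;> simp [hik, hjk, h]

lemma pvIncAt_pos (xs : List Int) (k : Int) (h : pvOkIdx xs.length k) :
    pvIncAt xs k = xs.modify (pvWrap xs.length k).toNat (· + 1) := by
  unfold pvIncAt; exact if_pos h

lemma pvIncAt_neg (xs : List Int) (k : Int) (h : ¬ pvOkIdx xs.length k) : pvIncAt xs k = xs := by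
  unfold pvIncAt; exact if_neg h

lemma pvIncAt_comm (xs : List Int) (k k' : Int) :
    pvIncAt (pvIncAt xs k) k' = pvIncAt (pvIncAt xs k') k := by
  by_cases h1 : pvOkIdx xs.length k <;> by_cases h2 : pvOkIdx xs.length k'
  · rw [pvIncAt_pos xs k h1, pvIncAt_pos xs k' h2,
      pvIncAt_pos _ k' (by simpa using h2), pvIncAt_pos _ k (by simpa using h1)]
    simp only [List.length_modify]
    exact modify_comm _ _ (fun x => rfl) xs _ _
  · rw [pvIncAt_pos xs k h1, pvIncAt_neg xs k' h2, pvIncAt_neg _ k' (by simpa using h2),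
      pvIncAt_pos xs k h1]
  · rw [pvIncAt_neg xs k h1, pvIncAt_pos xs k' h2, pvIncAt_neg _ k (by simpa using h1)]
  · rw [pvIncAt_neg xs k h1, pvIncAt_neg xs k' h2, pvIncAt_neg xs k h1]

lemma pvIncRowAt_pos (xss : List (List Int)) (k r : Int) (h : pvOkIdx xss.length k) :
    pvIncRowAt xss k r = xss.modify (pvWrap xss.length k).toNat (fun row => pvIncAt row r) := by
  unfold pvIncRowAt; exact if_pos h

lemma pvIncRowAt_neg (xss : List (List Int)) (k r : Int) (h : ¬ pvOkIdx xss.length k) :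
    pvIncRowAt xss k r = xss := by
  unfold pvIncRowAt; exact if_neg h

lemma pvIncRowAt_comm (xss : List (List Int)) (k r k' r' : Int) :
    pvIncRowAt (pvIncRowAt xss k r) k' r' = pvIncRowAt (pvIncRowAt xss k' r') k r := by
  by_cases h1 : pvOkIdx xss.length k <;> by_cases h2 : pvOkIdx xss.length k'
  · rw [pvIncRowAt_pos xss k r h1, pvIncRowAt_pos xss k' r' h2,
      pvIncRowAt_pos _ k' r' (by simpa using h2), pvIncRowAt_pos _ k r (by simpa using h1)]
    simp only [List.length_modify]
    exact modify_comm _ _ (fun row => pvIncAt_comm row r' r) xss _ _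
  · rw [pvIncRowAt_pos xss k r h1, pvIncRowAt_neg xss k' r' h2,
      pvIncRowAt_neg _ k' r' (by simpa using h2), pvIncRowAt_pos xss k r h1]
  · rw [pvIncRowAt_neg xss k r h1, pvIncRowAt_pos xss k' r' h2,
      pvIncRowAt_neg _ k r (by simpa using h1)]
  · rw [pvIncRowAt_neg xss k r h1, pvIncRowAt_neg xss k' r' h2, pvIncRowAt_neg xss k r h1]

lemma pvW_rightComm (J_pair : List String) (ar : Int) (s : List (List Int) × List Int)
    (p q : Int × Int) : pvW J_pair ar (pvW J_pair ar s p) q = pvW J_pair ar (pvW J_pair ar s q) p := by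
  obtain ⟨wt, wtf⟩ := s
  unfold pvW
  cases h1 : PySem.List.index? J_pair (pvKey p.1 p.2) <;>
    cases h2 : PySem.List.index? J_pair (pvKey q.1 q.2) <;>
      simp [pvIncAt_comm, pvIncRowAt_comm]

lemma pvV_rightComm (J_pair : List String) (ar : Int) (s : List Int × List (List Int))
    (p q : Int × Int) : pvV J_pair ar (pvV J_pair ar s p) q = pvV J_pair ar (pvV J_pair ar s q) p := by
  obtain ⟨sv, ivt⟩ := s
  unfold pvV
  cases h1 : PySem.List.index? J_pair (pvKey p.1 p.2) <;>
    cases h2 : PySem.List.index? J_pair (pvKey q.1 q.2) <;>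
      simp [pvIncAt_comm, pvIncRowAt_comm]

lemma foldl_emit {α β σ : Type} (u : σ → β → σ) (f : σ → α → σ) (h : α → List β)
    (hstep : ∀ s a, f s a = (h a).foldl u s) (l : List α) (s : σ) :
    l.foldl f s = (l.flatMap h).foldl u s := by
  induction l generalizing s with
  | nil => simp
  | cons a l ih =>
    simp only [List.foldl_cons, List.flatMap_cons, List.foldl_append]
    rw [hstep, ih]

-- Port A is the pvUpd fold over the list of fired ordered pairs
lemma vote_counter_eq_fold (joc majority dissent sv : List Int) (J_pair : List String)
    (wt ivt : List (List Int)) (ci : Int) (wtf : List Int) :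
    vote_counter joc majority dissent sv J_pair wt ivt ci wtf =
      (pvPairsA joc joc.length).foldl (pvUpd majority dissent J_pair (ci - 1)) (sv, wt, ivt, wtf) := by
  unfold vote_counter pvPairsA
  refine foldl_emit _ _ _ (fun s i => ?_) _ _
  refine foldl_emit _ _ _ (fun s j => ?_) _ _
  show _ = ((pvPairA joc i j).toList).foldl (pvUpd majority dissent J_pair (ci - 1)) s
  dsimp only
  unfold pvPairA
  by_cases hlt : joc.getD i 0 < joc.getD j 0
  · simp only [if_pos hlt, Option.toList_some, List.foldl_cons, List.foldl_nil]
    unfold pvUpd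
    cases hidx : PySem.List.index? J_pair (pvKey (joc.getD i 0) (joc.getD j 0))
    · rfl
    · dsimp only
      split_ifs <;> first | rfl | tauto
  · simp only [if_neg hlt, Option.toList_none, List.foldl_nil]

-- the pvUpd fold splits into the worked-together fold (over all pairs) and the
-- voted-together fold (over the pairs passing pvVotedB)
lemma pvUpd_decomp (majority dissent : List Int) (J_pair : List String) (ar : Int)
    (L : List (Int × Int)) : ∀ (sv : List Int) (wt ivt : List (List Int)) (wtf : List Int),
    L.foldl (pvUpd majority dissent J_pair ar) (sv, wt, ivt, wtf) =
      (((L.filter (pvVotedB majority dissent)).foldl (pvV J_pair ar) (sv, ivt)).1,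
       (L.foldl (pvW J_pair ar) (wt, wtf)).1,
       ((L.filter (pvVotedB majority dissent)).foldl (pvV J_pair ar) (sv, ivt)).2,
       (L.foldl (pvW J_pair ar) (wt, wtf)).2) := by
  induction L with
  | nil => intro sv wt ivt wtf; simp
  | cons p L ih =>
    intro sv wt ivt wtf
    by_cases hv : (p.1 ∈ majority ∧ p.2 ∈ majority) ∨ (p.1 ∈ dissent ∧ p.2 ∈ dissent)
    · have hb : pvVotedB majority dissent p = true := by
        unfold pvVotedB; simpa [Bool.or_eq_true, Bool.and_eq_true, decide_eq_true_iff] using hv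
      cases hidx : PySem.List.index? J_pair (pvKey p.1 p.2) with
      | none =>
        simp only [List.foldl_cons, List.filter_cons_of_pos hb, pvUpd, pvV, pvW, hidx]
        exact ih sv wt ivt wtf
      | some m =>
        simp only [List.foldl_cons, List.filter_cons_of_pos hb, pvUpd, pvV, pvW, hidx, if_pos hv]
        exact ih _ _ _ _
    · have hb : pvVotedB majority dissent p = false :=
        Bool.eq_false_iff.mpr (fun hbt => hv (by
          simpa [pvVotedB, Bool.or_eq_true, Bool.and_eq_true, decide_eq_true_iff] using hbt))
      cases hidx : PySem.List.index? J_pair (pvKey p.1 p.2) with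
      | none =>
        rw [List.filter_cons_of_neg (by simp [hb])]
        simp only [List.foldl_cons, pvUpd, pvW, hidx]
        exact ih sv wt ivt wtf
      | some m =>
        rw [List.filter_cons_of_neg (by simp [hb])]
        simp only [List.foldl_cons, pvUpd, pvW, hidx, if_neg hv]
        exact ih _ _ _ _

lemma flatMap_append_perm {α β : Type} (l : List α) (f g : α → List β) :
    (l.flatMap fun a => f a ++ g a).Perm (l.flatMap f ++ l.flatMap g) := by
  induction l with
  | nil => simp
  | cons a l ih =>
    simp only [List.flatMap_cons]
    have h1 : ((f a ++ g a) ++ l.flatMap fun a => f a ++ g a).Perm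
        ((f a ++ g a) ++ (l.flatMap f ++ l.flatMap g)) := ih.append_left _
    refine h1.trans ?_
    have h2 : (g a ++ (l.flatMap f ++ l.flatMap g)).Perm (l.flatMap f ++ (g a ++ l.flatMap g)) := by
      rw [← List.append_assoc, ← List.append_assoc]
      exact List.perm_append_comm.append_right _
    calc ((f a ++ g a) ++ (l.flatMap f ++ l.flatMap g)).Perm
          (f a ++ (l.flatMap f ++ (g a ++ l.flatMap g))) := by
            rw [List.append_assoc]; exact h2.append_left _
      _ = (f a ++ l.flatMap f) ++ (g a ++ l.flatMap g) := by rw [List.append_assoc]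

lemma map_getD_range (l : List Int) : (List.range l.length).map (fun i => l.getD i 0) = l := by
  apply List.ext_getElem
  · simp
  · intro k hk1 hk2
    simp [List.getD_eq_getElem?_getD, List.getElem?_eq_getElem hk2]

lemma flatMap_range_getD {β : Type} (l : List Int) (h : Int → List β) :
    (List.range l.length).flatMap (fun i => h (l.getD i 0)) = l.flatMap h := by
  conv_rhs => rw [← map_getD_range l]
  rw [List.flatMap_map]

-- the two one-sided emissions at a fixed pair of values fuse into pvNorm
lemma pvNorm_fuse (a b : Int) :
    (if a < b then [((a : Int), (b : Int))] else []) ++ (if b < a then [((b : Int), (a : Int))] else []) =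
      (pvNorm a b).toList := by
  unfold pvNorm
  split_ifs <;> first | rfl | omega

-- pvPairA on a cons, by index case
lemma pvPairA_zero_zero (a : Int) (t : List Int) : (pvPairA (a :: t) 0 0).toList = [] := by
  simp [pvPairA]

lemma pvPairA_zero_succ (a : Int) (t : List Int) (j : Nat) :
    (pvPairA (a :: t) 0 (j + 1)).toList =
      (if a < t.getD j 0 then [((a : Int), t.getD j 0)] else []) := by
  simp only [pvPairA, List.getD_cons_zero, List.getD_cons_succ]
  split_ifs <;> rfl

lemma pvPairA_succ_zero (a : Int) (t : List Int) (i : Nat) :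
    (pvPairA (a :: t) (i + 1) 0).toList =
      (if t.getD i 0 < a then [((t.getD i 0 : Int), a)] else []) := by
  simp only [pvPairA, List.getD_cons_zero, List.getD_cons_succ]
  split_ifs <;> rfl

lemma pvPairA_succ_succ (a : Int) (t : List Int) (i j : Nat) :
    pvPairA (a :: t) (i + 1) (j + 1) = pvPairA t i j := by
  simp [pvPairA]

-- A's index-pair emission is a permutation of Source B's `_pairs`
lemma pairsA_perm_pairsOf (l : List Int) : (pvPairsA l l.length).Perm (pvPairsOf l) := by
  induction l with
  | nil => simp [pvPairsA, pvPairsOf]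
  | cons a t ih =>
    have hA : pvPairsA (a :: t) (a :: t).length =
        ((List.range t.length).flatMap fun j => (if a < t.getD j 0 then [((a : Int), t.getD j 0)] else [])) ++
        ((List.range t.length).flatMap fun i =>
          (if t.getD i 0 < a then [((t.getD i 0 : Int), a)] else []) ++
          (List.range t.length).flatMap (fun j => (pvPairA t i j).toList)) := by
      simp only [pvPairsA, List.length_cons, List.range_succ_eq_map, List.flatMap_cons,
        List.flatMap_map, Nat.succ_eq_add_one, pvPairA_zero_zero, pvPairA_zero_succ,
        pvPairA_succ_zero, pvPairA_succ_succ, List.nil_append]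
    rw [hA, pvPairsOf]
    refine ((flatMap_append_perm (List.range t.length)
      (fun i => if t.getD i 0 < a then [((t.getD i 0 : Int), a)] else [])
      (fun i => (List.range t.length).flatMap (fun j => (pvPairA t i j).toList))).append_left
      _).trans ?_
    rw [← List.append_assoc]
    have hfront : (((List.range t.length).flatMap fun j =>
          (if a < t.getD j 0 then [((a : Int), t.getD j 0)] else [])) ++
        ((List.range t.length).flatMap fun i =>
          (if t.getD i 0 < a then [((t.getD i 0 : Int), a)] else []))).Perm
        (t.filterMap (pvNorm a)) := by
      refine (flatMap_append_perm (List.range t.length)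
        (fun j => if a < t.getD j 0 then [((a : Int), t.getD j 0)] else [])
        (fun i => if t.getD i 0 < a then [((t.getD i 0 : Int), a)] else [])).symm.trans ?_
      apply List.Perm.of_eq
      have hfun : (fun x => (if a < t.getD x 0 then [((a : Int), t.getD x 0)] else []) ++
          (if t.getD x 0 < a then [((t.getD x 0 : Int), a)] else [])) =
          (fun x => (pvNorm a (t.getD x 0)).toList) := funext (fun x => pvNorm_fuse a _)
      rw [hfun, List.filterMap_eq_flatMap_toList]
      exact flatMap_range_getD t (fun b => (pvNorm a b).toList)
    exact hfront.append ih

-- filtering the justices first is filtering the pairs on both components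
lemma filterMap_norm_filter (q : Int → Bool) (a : Int) (t : List Int) (hq : q a = true) :
    (t.filter q).filterMap (pvNorm a) =
      (t.filterMap (pvNorm a)).filter (fun p => q p.1 && q p.2) := by
  induction t with
  | nil => rfl
  | cons b t iht =>
    cases hn : pvNorm a b with
    | none =>
      cases hqb : q b <;>
        simp [hn, hqb, iht]
    | some p =>
      have hq2 : (q p.1 && q p.2) = q b := by
        have hp : p = (a, b) ∨ p = (b, a) := by
          unfold pvNorm at hn; split_ifs at hn <;> simp_all
        rcases hp with hpe | hpe <;> subst hpe <;> simp [hq]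
      cases hqb : q b <;>
        simp [hn, hqb, hq2, iht]

lemma filter_filterMap_norm_nil (q : Int → Bool) (a : Int) (t : List Int) (hq : q a = false) :
    (t.filterMap (pvNorm a)).filter (fun p => q p.1 && q p.2) = [] := by
  rw [List.filter_eq_nil_iff]
  intro p hp
  obtain ⟨b, _, hnorm⟩ := List.mem_filterMap.mp hp
  unfold pvNorm at hnorm
  split_ifs at hnorm <;> cases hnorm <;> simp [hq]

lemma pairsOf_filter (q : Int → Bool) (l : List Int) :
    pvPairsOf (l.filter q) = (pvPairsOf l).filter (fun p => q p.1 && q p.2) := by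
  induction l with
  | nil => rfl
  | cons a t ihl =>
    cases hqa : q a
    · rw [List.filter_cons_of_neg (by simp [hqa])]
      rw [pvPairsOf, List.filter_append, filter_filterMap_norm_nil q a t hqa, List.nil_append, ihl]
    · rw [List.filter_cons_of_pos hqa, pvPairsOf, pvPairsOf, List.filter_append,
        filterMap_norm_filter q a t hqa, ihl]

-- a disjunctive filter splits (second disjunct taken only where the first fails)
lemma filter_or_split {α : Type} (p1 p2 : α → Bool) (l : List α) :
    (l.filter (fun x => p1 x || p2 x)).Perm (l.filter p1 ++ l.filter (fun x => p2 x && !p1 x)) := by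
  induction l with
  | nil => simp
  | cons x l ih =>
    by_cases h1 : p1 x = true
    · simpa [h1] using ih.cons x
    · have h1' : p1 x = false := by simpa using h1
      by_cases h2 : p2 x = true
      · simp only [List.filter_cons, h1', h2, Bool.false_or, Bool.not_false,
          Bool.and_true]
        exact (ih.cons x).trans List.perm_middle.symm
      · have h2' : p2 x = false := by simpa using h2
        simpa [h1', h2'] using ih

-- ===== VERDICT (by name: the statement is the Claim_ definition above) =====
theorem vote_counter_spec : Claim_equal_vote_counter := by
  intro joc majority dissent sv J_pair wt ivt ci wtf _hDom _hPre
  unfold Spec_vote_counter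
  rw [vote_counter_eq_fold, pvUpd_decomp]
  haveI : RightCommutative (pvW J_pair (ci - 1)) := ⟨fun s p q => pvW_rightComm J_pair (ci - 1) s p q⟩
  haveI : RightCommutative (pvV J_pair (ci - 1)) := ⟨fun s p q => pvV_rightComm J_pair (ci - 1) s p q⟩
  have hperm := pairsA_perm_pairsOf joc
  have hW : (pvPairsA joc joc.length).foldl (pvW J_pair (ci - 1)) (wt, wtf) =
      (pvPairsOf joc).foldl (pvW J_pair (ci - 1)) (wt, wtf) := hperm.foldl_eq _
  have hVperm : ((pvPairsA joc joc.length).filter (pvVotedB majority dissent)).Perm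
      (pvPairsOf (joc.filter (fun j => decide (j ∈ majority))) ++
        (pvPairsOf (joc.filter (fun j => decide (j ∈ dissent)))).filter
          (fun p => !(decide (p.1 ∈ majority) && decide (p.2 ∈ majority)))) := by
    refine (hperm.filter _).trans ?_
    rw [pairsOf_filter, pairsOf_filter, List.filter_filter]
    have : (pvVotedB majority dissent) = (fun p : Int × Int =>
        (decide (p.1 ∈ majority) && decide (p.2 ∈ majority)) ||
        (decide (p.1 ∈ dissent) && decide (p.2 ∈ dissent))) := rfl
    rw [this]
    refine (filter_or_split _ _ _).trans ?_
    apply List.Perm.append_left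
    apply List.Perm.of_eq
    apply List.filter_congr
    intro p _
    simp [Bool.and_comm]
  have hV : ((pvPairsA joc joc.length).filter (pvVotedB majority dissent)).foldl
      (pvV J_pair (ci - 1)) (sv, ivt) =
      (pvPairsOf (joc.filter (fun j => decide (j ∈ majority))) ++
        (pvPairsOf (joc.filter (fun j => decide (j ∈ dissent)))).filter
          (fun p => !(decide (p.1 ∈ majority) && decide (p.2 ∈ majority)))).foldl
        (pvV J_pair (ci - 1)) (sv, ivt) := hVperm.foldl_eq _
  rw [hW, hV]
  rfl
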